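-- pv_equiv track=rewrite | github.com/julynervs/ml-bling | utils.py | converte_abrevmes_para_nummes
-- ===== SOURCE A (Python) =====
-- def converte_abrevmes_para_nummes(data):
--     relacao_mes = {
--         " jan ": "01",
--         " fev ": "02",
--         " mar ": "03",
--         " abr ": "04",
--         " mai ": "05",
--         " jun ": "06",
--         " jul ": "07",
--         " ago ": "08",
--         " set ": "09",
--         " out ": "10",
--         " nov ": "11",
--         " dez ": "12",
--     }
--
--     for mes_txt, mes_num in relacao_mes.items():
--         if mes_txt in data:
--             data = data.replace(mes_txt, ("/" + mes_num + "/"))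
--
--     return data
-- ===== SOURCE B (Python) =====
-- def converte_abrevmes_para_nummes(data):
--     abrev = {"jan": "01", "fev": "02", "mar": "03", "abr": "04", "mai": "05", "jun": "06",
--              "jul": "07", "ago": "08", "set": "09", "out": "10", "nov": "11", "dez": "12"}
--     out = []
--     i = 0
--     n = len(data)
--     while i < n:
--         if data[i] == " " and i + 4 < n and data[i + 4] == " ":
--             num = abrev.get(data[i + 1:i + 4])
--             if num is not None:
--                 out.append("/" + num + "/")
--                 i += 5
--                 continue
--         out.append(data[i])
--         i += 1
--     return "".join(out)
-- ===== Notes on version B (the rewrite author's own statement) =====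
-- stated objective: alternative
-- what changed: Replaces A's 12 sequential full-string str.replace passes (one per month) by a single left-to-right index scan that tests the two framing spaces and dict-looks-up the 3-letter abbreviation, emitting either the slash-delimited month number (advancing 5) or the current character.
-- outside the precondition, e.g. on converte_abrevmes_para_nummes(' fev jan '): A returns ' fev/01/', B returns '/02/jan '; on converte_abrevmes_para_nummes(' jan fev '): A returns '/01/fev ', B returns '/01/fev '
import Mathlib
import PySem

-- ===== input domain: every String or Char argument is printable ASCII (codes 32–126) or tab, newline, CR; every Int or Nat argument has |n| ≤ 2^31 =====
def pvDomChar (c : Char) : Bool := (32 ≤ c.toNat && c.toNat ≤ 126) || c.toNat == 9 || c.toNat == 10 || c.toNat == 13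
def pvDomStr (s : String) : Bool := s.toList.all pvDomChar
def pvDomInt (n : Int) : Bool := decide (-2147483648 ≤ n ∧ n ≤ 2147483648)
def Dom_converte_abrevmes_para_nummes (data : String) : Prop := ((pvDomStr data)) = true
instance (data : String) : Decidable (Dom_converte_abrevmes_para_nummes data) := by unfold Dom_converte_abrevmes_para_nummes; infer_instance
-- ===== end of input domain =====

-- B replaces A's 12 sequential str.replace passes by one left-to-right index scan that tests the
-- two framing spaces and looks up the 3-letter abbreviation (objective: alternative single-pass
-- formulation; not measured faster).

-- ===== PORT A =====
-- A's month dict, in Python insertion order; keys/values written as their lists of characters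
def pvMeses : List (List Char × List Char) :=
  [([' ', 'j', 'a', 'n', ' '], ['0', '1']),
   ([' ', 'f', 'e', 'v', ' '], ['0', '2']),
   ([' ', 'm', 'a', 'r', ' '], ['0', '3']),
   ([' ', 'a', 'b', 'r', ' '], ['0', '4']),
   ([' ', 'm', 'a', 'i', ' '], ['0', '5']),
   ([' ', 'j', 'u', 'n', ' '], ['0', '6']),
   ([' ', 'j', 'u', 'l', ' '], ['0', '7']),
   ([' ', 'a', 'g', 'o', ' '], ['0', '8']),
   ([' ', 's', 'e', 't', ' '], ['0', '9']),
   ([' ', 'o', 'u', 't', ' '], ['1', '0']),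
   ([' ', 'n', 'o', 'v', ' '], ['1', '1']),
   ([' ', 'd', 'e', 'z', ' '], ['1', '2'])]

-- for mes_txt, mes_num in relacao_mes.items(): if mes_txt in data: data = data.replace(mes_txt, "/"+mes_num+"/")
def converte_abrevmes_para_nummes (data : String) : String :=
  String.ofList (pvMeses.foldl
    (fun d kv => if PySem.Chars.isIn kv.1 d then PySem.Chars.replace d kv.1 ('/' :: kv.2 ++ ['/']) else d)
    data.toList)

-- ===== PORT B =====
-- abrev.get(data[i+1:i+4]): B's literal 3-letter dict is ported as the decision chain over the
-- three characters of the key, in the dict's insertion order (exact: get on a literal dict)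
def pvAbr (a b c : Char) : Option (List Char) :=
  if a = 'j' ∧ b = 'a' ∧ c = 'n' then some ['0', '1']
  else if a = 'f' ∧ b = 'e' ∧ c = 'v' then some ['0', '2']
  else if a = 'm' ∧ b = 'a' ∧ c = 'r' then some ['0', '3']
  else if a = 'a' ∧ b = 'b' ∧ c = 'r' then some ['0', '4']
  else if a = 'm' ∧ b = 'a' ∧ c = 'i' then some ['0', '5']
  else if a = 'j' ∧ b = 'u' ∧ c = 'n' then some ['0', '6']
  else if a = 'j' ∧ b = 'u' ∧ c = 'l' then some ['0', '7']
  else if a = 'a' ∧ b = 'g' ∧ c = 'o' then some ['0', '8']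
  else if a = 's' ∧ b = 'e' ∧ c = 't' then some ['0', '9']
  else if a = 'o' ∧ b = 'u' ∧ c = 't' then some ['1', '0']
  else if a = 'n' ∧ b = 'o' ∧ c = 'v' then some ['1', '1']
  else if a = 'd' ∧ b = 'e' ∧ c = 'z' then some ['1', '2']
  else none

-- while i < n: if data[i] == " " and i+4 < n and data[i+4] == " " and the 3-letter lookup hits,
-- emit "/NN/" and advance 5, else emit data[i] and advance 1.  The bounds check i+4 < n plus the
-- four single-character accesses become the 4-cons pattern on the tail; fuel = remaining length.
def pvScanGo : Nat → List Char → List Char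
  | 0, _ => []
  | _ + 1, [] => []
  | fuel + 1, c :: t =>
    if c = ' ' then
      match t with
      | a :: b :: d :: e :: rest =>
        if e = ' ' then
          match pvAbr a b d with
          | some num => '/' :: (num ++ '/' :: pvScanGo fuel rest)
          | none => c :: pvScanGo fuel t
        else c :: pvScanGo fuel t
      | _ => c :: pvScanGo fuel t
    else c :: pvScanGo fuel t

def converte_abrevmes_para_nummes_alt (data : String) : String :=
  String.ofList (pvScanGo data.toList.length data.toList)

-- ===== PRECONDITION & SPEC =====
-- Pre_ excludes strings containing two overlapping month abbreviations (sharing a space, e.g.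
-- " fev jan "): there A's result depends on the dict iteration order of its 12 replace passes
-- while B resolves the overlap left to right — both priorities are defensible corner choices no
-- caller would specify, and on some such strings (e.g. " jan fev ") the two coincide.
def Pre_converte_abrevmes_para_nummes (data : String) : Prop :=
  ∀ k1 ∈ pvMeses, ∀ k2 ∈ pvMeses, ¬ (k1.1 ++ k2.1.drop 1) <:+: data.toList
instance (data : String) : Decidable (Pre_converte_abrevmes_para_nummes data) := by
  unfold Pre_converte_abrevmes_para_nummes; infer_instance

def pvWitness_converte_abrevmes_para_nummes : String := "25 jan 2021"

def Spec_converte_abrevmes_para_nummes (data : String) (out : String) : Prop :=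
  out = converte_abrevmes_para_nummes_alt data
instance (data : String) (out : String) : Decidable (Spec_converte_abrevmes_para_nummes data out) := by
  unfold Spec_converte_abrevmes_para_nummes; infer_instance

-- ===== CLAIM (what is proved, stated in full; the proofs are below) =====
def Claim_equal_converte_abrevmes_para_nummes : Prop :=
  ∀ (data : String), Dom_converte_abrevmes_para_nummes data →
    Pre_converte_abrevmes_para_nummes data →
    Spec_converte_abrevmes_para_nummes data (converte_abrevmes_para_nummes data)

-- ===== LEMMAS AND PROOFS =====

-- the step function of A's fold and the per-pass shorthand
def pvStepA (d : List Char) (kv : List Char × List Char) : List Char :=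
  if PySem.Chars.isIn kv.1 d then PySem.Chars.replace d kv.1 ('/' :: kv.2 ++ ['/']) else d

-- reference recursion for Python str.replace with a nonempty pattern
def repl1 (old new : List Char) : List Char → List Char
  | [] => []
  | c :: t => if old.isPrefixOf (c :: t) then new ++ repl1 old new (t.drop (old.length - 1))
              else c :: repl1 old new t
termination_by l => l.length
decreasing_by all_goals simp only [List.length_drop, List.length_cons]; omega

def pvStepR (d : List Char) (kv : List Char × List Char) : List Char :=
  repl1 kv.1 ('/' :: kv.2 ++ ['/']) d

-- proof-only reformulation of B's scan: one lookup of the 5-character window in A's table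
def pvScanOld : Nat → List Char → List Char
  | 0, _ => []
  | _ + 1, [] => []
  | fuel + 1, c :: t =>
    match pvMeses.lookup ((c :: t).take 5) with
    | some num => '/' :: num ++ ['/'] ++ pvScanOld fuel (t.drop 4)
    | none => c :: pvScanOld fuel t

theorem repl1_cons (old new : List Char) (c : Char) (t : List Char) :
    repl1 old new (c :: t) =
      if old.isPrefixOf (c :: t) then new ++ repl1 old new (t.drop (old.length - 1))
      else c :: repl1 old new t := by rw [repl1]

-- shape of the 12 keys: " XYZ " with X,Y,Z neither ' ' nor '/'
theorem pvKeyShape : ∀ kv ∈ pvMeses, ∃ a b c, kv.1 = [' ', a, b, c, ' '] ∧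
    a ≠ ' ' ∧ b ≠ ' ' ∧ c ≠ ' ' ∧ a ≠ '/' ∧ b ≠ '/' ∧ c ≠ '/' := by
  intro kv h
  fin_cases h <;>
    exact ⟨_, _, _, rfl, by decide, by decide, by decide, by decide, by decide, by decide⟩

theorem pvValShape : ∀ kv ∈ pvMeses, ∃ d e, kv.2 = [d, e] ∧ d ≠ ' ' ∧ e ≠ ' ' := by
  intro kv h
  fin_cases h <;> exact ⟨_, _, rfl, by decide, by decide⟩

set_option maxRecDepth 8192 in
theorem pvKeysNodup : (pvMeses.map Prod.fst).Nodup := by decide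

theorem pvLookup_mem {l : List (List Char × List Char)} {a b : List Char}
    (h : l.lookup a = some b) : (a, b) ∈ l := by
  induction l with
  | nil => simp [List.lookup] at h
  | cons kv rest ih =>
    obtain ⟨k, v⟩ := kv
    rw [List.lookup_cons] at h
    by_cases hk : a == k
    · simp [hk] at h; subst h; simp_all
    · simp [hk] at h; exact List.mem_cons_of_mem _ (ih h)

theorem pvMem_lookup {l : List (List Char × List Char)} {a b : List Char}
    (h : (a, b) ∈ l) (nd : (l.map Prod.fst).Nodup) : l.lookup a = some b := by
  induction l with
  | nil => simp at h
  | cons kv rest ih =>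
    obtain ⟨k, v⟩ := kv
    rw [List.lookup_cons]
    rcases List.mem_cons.1 h with h1 | h1
    · obtain ⟨rfl, rfl⟩ := Prod.mk.injEq .. ▸ h1; simp
    · have hk : a ≠ k := by
        rintro rfl
        exact (List.nodup_cons.1 nd).1 (List.mem_map.2 ⟨_, h1, rfl⟩)
      simp [beq_eq_false_iff_ne.2 hk]
      exact ih h1 (List.nodup_cons.1 nd).2

-- PySem.Chars.replace with nonempty pattern equals repl1
theorem pvGoEq (old new : List Char) (hold : old ≠ []) :
    ∀ (fuel : Nat) (l acc : List Char), l.length ≤ fuel →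
    PySem.Chars.replace.go old new fuel l acc = acc.reverse ++ repl1 old new l := by
  intro fuel
  induction fuel with
  | zero =>
    intro l acc h
    have hl : l = [] := List.length_eq_zero_iff.1 (Nat.le_zero.1 h)
    subst hl
    simp [PySem.Chars.replace.go, repl1]
  | succ n ih =>
    intro l acc h
    cases l with
    | nil => simp [PySem.Chars.replace.go, repl1]
    | cons c t =>
      rw [PySem.Chars.replace.go]
      by_cases hp : old.isPrefixOf (c :: t)
      · rw [if_pos hp]
        obtain ⟨o, ot, rfl⟩ : ∃ o ot, old = o :: ot := by
          cases old with
          | nil => exact absurd rfl hold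
          | cons o ot => exact ⟨o, ot, rfl⟩
        have hlen : (List.drop (o :: ot).length (c :: t)).length ≤ n := by
          simp only [List.length_drop, List.length_cons] at *
          omega
        rw [ih _ _ hlen]
        have hdrop : List.drop (o :: ot).length (c :: t) = t.drop ((o :: ot).length - 1) := by
          simp
        rw [hdrop, repl1, if_pos hp]
        simp
      · rw [if_neg hp]
        have hlen : t.length ≤ n := by
          simp only [List.length_cons] at h; omega
        rw [ih _ _ hlen, repl1, if_neg hp]
        simp

theorem pvReplaceEq (old new s : List Char) (hold : old ≠ []) :
    PySem.Chars.replace s old new = repl1 old new s := by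
  rw [PySem.Chars.replace]
  rw [if_neg (by simp [List.isEmpty_iff, hold])]
  have := pvGoEq old new hold s.length s [] le_rfl
  simpa using this

-- replace with no occurrence is the identity
theorem pvRepl1NotInfix (old new s : List Char) (h : ¬ old <:+: s) : repl1 old new s = s := by
  induction s with
  | nil => simp [repl1]
  | cons c t ih =>
    rw [repl1, if_neg (by
      simp only [List.isPrefixOf_iff_prefix]
      exact fun hp => h hp.isInfix)]
    rw [ih (fun hi => h (List.infix_cons hi))]

-- skip lemma: no match in the first n positions
theorem pvRepl1Skip (old new : List Char) :
    ∀ (n : Nat) (s : List Char), (∀ j < n, ¬ old <+: s.drop j) →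
    repl1 old new s = s.take n ++ repl1 old new (s.drop n) := by
  intro n
  induction n with
  | zero => intro s _; simp
  | succ m ih =>
    intro s hj
    cases s with
    | nil => simp [repl1]
    | cons c t =>
      have h0 : ¬ old <+: (c :: t) := by simpa using hj 0 (Nat.succ_pos m)
      rw [repl1, if_neg (by simpa [List.isPrefixOf_iff_prefix] using h0)]
      rw [ih t (fun j hjm => by simpa using hj (j + 1) (by omega))]
      simp

-- dichotomy: a pass either keeps the first m chars or puts a '/' among them
theorem pvDich (old r : List Char) :
    ∀ (s : List Char) (m : Nat),
      (repl1 old ('/' :: r) s).take m = s.take m ∨ '/' ∈ (repl1 old ('/' :: r) s).take m := by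
  intro s
  induction s with
  | nil => intro m; left; simp [repl1]
  | cons c t ih =>
    intro m
    rw [repl1]
    by_cases hp : old.isPrefixOf (c :: t)
    · rw [if_pos hp]
      cases m with
      | zero => left; simp
      | succ m' => right; simp
    · rw [if_neg hp]
      cases m with
      | zero => left; simp
      | succ m' =>
        rcases ih m' with h | h
        · left; simp [List.take_succ_cons, h]
        · right; simp only [List.take_succ_cons, List.mem_cons]; exact Or.inr h

-- a '/' among the first m chars survives a pass
theorem pvPersist (old r : List Char) :
    ∀ (s : List Char) (m : Nat), '/' ∈ s.take m → '/' ∈ (repl1 old ('/' :: r) s).take m := by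
  intro s
  induction s with
  | nil => intro m h; simp at h
  | cons c t ih =>
    intro m h
    cases m with
    | zero => simp at h
    | succ m' =>
      rw [repl1]
      by_cases hp : old.isPrefixOf (c :: t)
      · rw [if_pos hp]; simp
      · rw [if_neg hp]
        simp only [List.take_succ_cons, List.mem_cons] at h ⊢
        rcases h with h | h
        · exact Or.inl h
        · exact Or.inr (ih m' h)

-- a pass cannot create a new key match at the head
theorem pvNoCreate (old r w : List Char) (hw : w.length = 4) (hw2 : '/' ∉ w) :
    ∀ s : List Char, ¬ (' ' :: w) <+: s → ¬ (' ' :: w) <+: repl1 old ('/' :: r) s := by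
  intro s
  induction s with
  | nil =>
    intro _ hcon
    rw [repl1] at hcon
    exact absurd (List.eq_nil_of_prefix_nil hcon) (by simp)
  | cons c t ih =>
    intro h hcon
    rw [repl1] at hcon
    by_cases hp : old.isPrefixOf (c :: t)
    · rw [if_pos hp] at hcon
      have := (List.cons_prefix_cons.1 hcon).1
      simp at this
    · rw [if_neg hp] at hcon
      obtain ⟨hc, hwp⟩ := List.cons_prefix_cons.1 hcon
      subst hc
      have hwt : ¬ w <+: t := fun hwt => h (List.cons_prefix_cons.2 ⟨rfl, hwt⟩)
      have hweq : w = (repl1 old ('/' :: r) t).take 4 := by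
        have := List.prefix_iff_eq_take.1 hwp
        rwa [hw] at this
      rcases pvDich old r t 4 with hd | hd
      · rw [hd] at hweq
        exact hwt (hweq ▸ (by simpa [hw] using List.take_prefix 4 t))
      · rw [← hweq] at hd
        exact hw2 hd

-- fold of passes over a string none of whose keys match at the head
theorem pvFoldNoHead (ks : List (List Char × List Char)) (hks : ∀ kv ∈ ks, kv ∈ pvMeses) :
    ∀ (c : Char) (t : List Char), (∀ kv ∈ ks, ¬ kv.1 <+: (c :: t)) →
    ks.foldl pvStepR (c :: t) = c :: ks.foldl pvStepR t := by
  induction ks with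
  | nil => intro c t _; simp
  | cons kv rest ih =>
    intro c t h
    have h0 : ¬ kv.1 <+: (c :: t) := h kv (List.mem_cons_self ..)
    have hstep : pvStepR (c :: t) kv = c :: pvStepR t kv := by
      unfold pvStepR
      rw [repl1_cons, if_neg (by simpa [List.isPrefixOf_iff_prefix] using h0)]
    simp only [List.foldl_cons, hstep]
    refine ih (fun kv' h' => hks kv' (List.mem_cons_of_mem _ h')) c _ ?_
    intro kv' h'
    have hmem' := hks kv' (List.mem_cons_of_mem _ h')
    obtain ⟨a, b, c₀, heq, ha, hb, hc, ha', hb', hc'⟩ := pvKeyShape kv' hmem'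
    have hprev : ¬ kv'.1 <+: (c :: t) := h kv' (List.mem_cons_of_mem _ h')
    have hnc := pvNoCreate kv.1 (kv.2 ++ ['/']) [a, b, c₀, ' '] rfl
      (by simp; exact ⟨fun hx => ha' hx.symm, fun hx => hb' hx.symm, fun hx => hc' hx.symm⟩)
      (c :: t) (by rw [heq] at hprev; exact hprev)
    rw [heq]
    intro hcon
    apply hnc
    have hrw : repl1 kv.1 ('/' :: (kv.2 ++ ['/'])) (c :: t) = c :: pvStepR t kv := by
      unfold pvStepR
      rw [repl1_cons, if_neg (by simpa [List.isPrefixOf_iff_prefix] using h0)]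
      rfl
    rw [hrw]
    exact hcon

-- fold of passes over a string starting with an inserted "/NN/" block
theorem pvFoldNew (ks : List (List Char × List Char)) (hks : ∀ kv ∈ ks, kv ∈ pvMeses) :
    ∀ (v x : List Char), v.length = 2 → (∀ ch ∈ v, ch ≠ ' ') →
    ks.foldl pvStepR (('/' :: v ++ ['/']) ++ x) = ('/' :: v ++ ['/']) ++ ks.foldl pvStepR x := by
  induction ks with
  | nil => intro v x _ _; simp
  | cons kv rest ih =>
    intro v x hv2 hvs
    obtain ⟨d, e, rfl⟩ := List.length_eq_two.1 hv2
    obtain ⟨a, b, c₀, heq, ha, hb, hc, _, _, _⟩ := pvKeyShape kv (hks kv (List.mem_cons_self ..))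
    have hd : d ≠ ' ' := hvs d (by simp)
    have he : e ≠ ' ' := hvs e (by simp)
    have hstep : pvStepR (('/' :: [d, e] ++ ['/']) ++ x) kv =
        ('/' :: [d, e] ++ ['/']) ++ pvStepR x kv := by
      unfold pvStepR
      rw [pvRepl1Skip kv.1 _ 4 _ ?_]
      · simp
      · intro j hj
        interval_cases j
        · intro hp
          rw [heq] at hp
          simp only [List.cons_append, List.nil_append, List.drop_zero] at hp
          exact absurd (List.cons_prefix_cons.1 hp).1 (by simp)
        · intro hp
          rw [heq] at hp
          simp only [List.cons_append, List.nil_append, List.drop_succ_cons,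
            List.drop_zero] at hp
          exact absurd (List.cons_prefix_cons.1 hp).1 (by simp [Ne.symm hd])
        · intro hp
          rw [heq] at hp
          simp only [List.cons_append, List.nil_append, List.drop_succ_cons,
            List.drop_zero] at hp
          exact absurd (List.cons_prefix_cons.1 hp).1 (by simp [Ne.symm he])
        · intro hp
          rw [heq] at hp
          simp only [List.cons_append, List.nil_append, List.drop_succ_cons,
            List.drop_zero] at hp
          exact absurd (List.cons_prefix_cons.1 hp).1 (by simp)
    simp only [List.foldl_cons, hstep]
    exact ih (fun kv' h' => hks kv' (List.mem_cons_of_mem _ h')) [d, e] _ rfl hvs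

-- fold of passes over a string starting with the key pm, given no overlapping match
theorem pvFoldMatch (ks : List (List Char × List Char)) (hks : ∀ kv ∈ ks, kv ∈ pvMeses)
    (nd : (ks.map Prod.fst).Nodup) :
    ∀ (pm vm : List Char), (pm, vm) ∈ ks →
    ∀ (u d' : List Char), (∀ kv ∈ ks, ¬ kv.1.drop 1 <+: u) →
      (d'.take 4 = u.take 4 ∨ '/' ∈ d'.take 4) →
      ks.foldl pvStepR (pm ++ d') = ('/' :: vm ++ ['/']) ++ ks.foldl pvStepR d' := by
  induction ks with
  | nil => intro pm vm h; simp at h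
  | cons kv rest ih =>
    intro pm vm hmem u d' h4 hD
    have hpmem : (pm, vm) ∈ pvMeses := hks _ hmem
    obtain ⟨a, b, c₀, hpm, hpa, hpb, hpc, hpa', hpb', hpc'⟩ := pvKeyShape (pm, vm) hpmem
    simp only at hpm
    by_cases hk : kv.1 = pm
    · have hkv : kv = (pm, vm) := by
        rcases List.mem_cons.1 hmem with h1 | h1
        · exact h1.symm
        · exfalso
          have hin : pm ∈ rest.map Prod.fst := List.mem_map.2 ⟨_, h1, rfl⟩
          rw [← hk] at hin
          exact (List.nodup_cons.1 nd).1 hin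
      subst hkv
      have hstep : pvStepR (pm ++ d') (pm, vm) =
          ('/' :: vm ++ ['/']) ++ repl1 pm ('/' :: vm ++ ['/']) d' := by
        show repl1 pm ('/' :: (vm ++ ['/'])) (pm ++ d') =
          ('/' :: vm ++ ['/']) ++ repl1 pm ('/' :: vm ++ ['/']) d'
        rw [hpm, List.cons_append, repl1_cons,
          if_pos (List.isPrefixOf_iff_prefix.2 (by
            rw [← List.cons_append]; exact List.prefix_append _ d'))]
        simp
      simp only [List.foldl_cons, hstep]
      obtain ⟨dv, ev, hv, hdv, hev⟩ := pvValShape (pm, vm) hpmem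
      have hv' : vm = [dv, ev] := hv
      rw [pvFoldNew rest (fun kv' h' => hks kv' (List.mem_cons_of_mem _ h')) vm _
            (by rw [hv']; rfl)
            (by intro ch hch
                rw [hv'] at hch
                rcases List.mem_cons.1 hch with rfl | hch2
                · exact hdv
                · rcases List.mem_cons.1 hch2 with rfl | h3
                  · exact hev
                  · simp at h3)]
      rfl
    · obtain ⟨a', b', c', hkq, ha', hb', hc', ha2, hb2, hc2⟩ :=
        pvKeyShape kv (hks kv (List.mem_cons_self ..))
      have hmem' : (pm, vm) ∈ rest := by
        rcases List.mem_cons.1 hmem with h1 | h1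
        · exact absurd (congrArg Prod.fst h1.symm) hk
        · exact h1
      have hstep : pvStepR (pm ++ d') kv = pm ++ pvStepR d' kv := by
        unfold pvStepR
        rw [pvRepl1Skip kv.1 _ 5 _ ?_]
        · rw [hpm]; simp
        · intro j hj
          interval_cases j
          · intro hp
            have hlen : kv.1.length = 5 := by rw [hkq]; rfl
            have hq : kv.1 = (pm ++ d').take 5 := by
              have := List.prefix_iff_eq_take.1 hp
              rwa [hlen] at this
            rw [hpm] at hq
            simp only [List.cons_append, List.nil_append, List.take_succ_cons,
              List.take_zero] at hq
            rw [hpm] at hk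
            exact hk (by simpa using hq)
          · intro hp
            rw [hpm] at hp
            simp only [List.cons_append, List.nil_append, List.drop_succ_cons,
              List.drop_zero] at hp
            rw [hkq] at hp
            exact absurd (List.cons_prefix_cons.1 hp).1 (Ne.symm hpa)
          · intro hp
            rw [hpm] at hp
            simp only [List.cons_append, List.nil_append, List.drop_succ_cons,
              List.drop_zero] at hp
            rw [hkq] at hp
            exact absurd (List.cons_prefix_cons.1 hp).1 (Ne.symm hpb)
          · intro hp
            rw [hpm] at hp
            simp only [List.cons_append, List.nil_append, List.drop_succ_cons,
              List.drop_zero] at hp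
            rw [hkq] at hp
            exact absurd (List.cons_prefix_cons.1 hp).1 (Ne.symm hpc)
          · -- j = 4 : an overlapping match, excluded by h4 and the dichotomy invariant
            intro hp
            rw [hpm] at hp
            simp only [List.cons_append, List.nil_append, List.drop_succ_cons,
              List.drop_zero] at hp
            rw [hkq] at hp
            obtain ⟨_, hwp⟩ := List.cons_prefix_cons.1 hp
            have hweq : [a', b', c', ' '] = d'.take 4 := by
              simpa using List.prefix_iff_eq_take.1 hwp
            rcases hD with hDl | hDr
            · rw [hDl] at hweq
              refine h4 kv (List.mem_cons_self ..) ?_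
              rw [hkq]
              simpa [← hweq] using List.take_prefix 4 u
            · rw [← hweq] at hDr
              simp only [List.mem_cons, List.not_mem_nil, or_false] at hDr
              rcases hDr with h | h | h | h
              · exact ha2 h.symm
              · exact hb2 h.symm
              · exact hc2 h.symm
              · exact absurd h (by decide)
      simp only [List.foldl_cons, hstep]
      have hD' : (pvStepR d' kv).take 4 = u.take 4 ∨ '/' ∈ (pvStepR d' kv).take 4 := by
        unfold pvStepR
        rcases hD with hDl | hDr
        · rcases pvDich kv.1 (kv.2 ++ ['/']) d' 4 with h' | h'
          · exact Or.inl (h'.trans hDl)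
          · exact Or.inr h'
        · exact Or.inr (pvPersist kv.1 (kv.2 ++ ['/']) d' 4 hDr)
      exact ih (fun kv' h' => hks kv' (List.mem_cons_of_mem _ h')) (List.nodup_cons.1 nd).2
        pm vm hmem' u _ (fun kv' h' => h4 kv' (List.mem_cons_of_mem _ h')) hD'

theorem pvFoldNil (ks : List (List Char × List Char)) : ks.foldl pvStepR [] = [] := by
  induction ks with
  | nil => rfl
  | cons kv rest ih => simpa [pvStepR, repl1] using ih

-- main induction: the 12-pass fold equals the window-lookup scan on overlap-free strings
theorem pvMain : ∀ (fuel : Nat) (s : List Char), s.length ≤ fuel →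
    (∀ k1 ∈ pvMeses, ∀ k2 ∈ pvMeses, ¬ (k1.1 ++ k2.1.drop 1) <:+: s) →
    pvMeses.foldl pvStepR s = pvScanOld fuel s := by
  intro fuel
  induction fuel with
  | zero =>
    intro s hl _
    have hs : s = [] := List.length_eq_zero_iff.1 (Nat.le_zero.1 hl)
    subst hs
    simp [pvScanOld, pvFoldNil]
  | succ n ih =>
    intro s hl hno
    cases s with
    | nil => simp [pvScanOld, pvFoldNil]
    | cons c t =>
      cases hlk : pvMeses.lookup ((c :: t).take 5) with
      | none =>
        have hnp : ∀ kv ∈ pvMeses, ¬ kv.1 <+: (c :: t) := by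
          intro kv hm hp
          obtain ⟨a, b, c₀, heq, _, _, _, _, _, _⟩ := pvKeyShape kv hm
          have hlen : kv.1.length = 5 := by rw [heq]; rfl
          have hq : kv.1 = (c :: t).take 5 := by
            have := List.prefix_iff_eq_take.1 hp
            rwa [hlen] at this
          rw [← hq, pvMem_lookup (by exact hm) pvKeysNodup] at hlk
          exact Option.some_ne_none _ hlk
        rw [pvFoldNoHead pvMeses (fun _ h => h) c t hnp]
        rw [ih t (by simp at hl ⊢; omega)
            (fun k1 h1 k2 h2 hinf => hno k1 h1 k2 h2 (List.infix_cons hinf))]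
        rw [pvScanOld, hlk]
      | some num =>
        have hmem := pvLookup_mem hlk
        have hdrop : (c :: t).drop 5 = t.drop 4 := rfl
        have hsplit : c :: t = (c :: t).take 5 ++ t.drop 4 := by
          conv_lhs => rw [← List.take_append_drop 5 (c :: t)]
          rfl
        have h4 : ∀ kv ∈ pvMeses, ¬ kv.1.drop 1 <+: t.drop 4 := by
          intro kv hm hp
          obtain ⟨r, hr⟩ := hp
          refine hno ((c :: t).take 5, num) hmem kv hm (List.IsPrefix.isInfix ⟨r, ?_⟩)
          show ((c :: t).take 5 ++ kv.1.drop 1) ++ r = c :: t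
          rw [List.append_assoc, hr, ← hsplit]
        have hfold := pvFoldMatch pvMeses (fun _ h => h) pvKeysNodup
          ((c :: t).take 5) num hmem (t.drop 4) (t.drop 4) h4 (Or.inl rfl)
        have hnov : ∀ k1 ∈ pvMeses, ∀ k2 ∈ pvMeses, ¬ (k1.1 ++ k2.1.drop 1) <:+: t.drop 4 := by
          intro k1 h1 k2 h2 hinf
          exact hno k1 h1 k2 h2 (List.infix_cons (hinf.trans (List.drop_suffix 4 t).isInfix))
        rw [pvScanOld, hlk]
        conv_lhs => rw [hsplit]
        rw [hfold]
        have hlen4 : (t.drop 4).length ≤ n := by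
          simp only [List.length_drop, List.length_cons] at hl ⊢
          omega
        rw [ih (t.drop 4) hlen4 hnov]

theorem pvStepAEq : ∀ (d : List Char), ∀ kv ∈ pvMeses, pvStepA d kv = pvStepR d kv := by
  intro d kv hm
  obtain ⟨a, b, c₀, heq, _, _, _, _, _, _⟩ := pvKeyShape kv hm
  unfold pvStepA pvStepR
  by_cases hin : PySem.Chars.isIn kv.1 d = true
  · rw [if_pos hin]
    exact pvReplaceEq kv.1 _ d (by rw [heq]; simp)
  · rw [if_neg hin]
    have hfalse : PySem.Chars.isIn kv.1 d = false := by simpa using hin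
    exact (pvRepl1NotInfix kv.1 _ d ((PySem.Chars.isIn_eq_false_iff _ _).1 hfalse)).symm

-- the table lookup on a 5-char window [' ',a,b,c,' '] is exactly B's 3-letter decision chain
set_option maxRecDepth 16384 in
theorem pvAbrLookup (a b c : Char) :
    pvMeses.lookup [' ', a, b, c, ' '] = pvAbr a b c := by
  unfold pvAbr
  by_cases h1 : a = 'j' ∧ b = 'a' ∧ c = 'n'
  · obtain ⟨rfl, rfl, rfl⟩ := h1
    rw [if_pos (show 'j' = 'j' ∧ 'a' = 'a' ∧ 'n' = 'n' from ⟨rfl, rfl, rfl⟩)]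
    decide
  · rw [if_neg h1]
    by_cases h2 : a = 'f' ∧ b = 'e' ∧ c = 'v'
    · obtain ⟨rfl, rfl, rfl⟩ := h2
      rw [if_pos ⟨rfl, rfl, rfl⟩]
      decide
    · rw [if_neg h2]
      by_cases h3 : a = 'm' ∧ b = 'a' ∧ c = 'r'
      · obtain ⟨rfl, rfl, rfl⟩ := h3
        rw [if_pos ⟨rfl, rfl, rfl⟩]
        decide
      · rw [if_neg h3]
        by_cases h4 : a = 'a' ∧ b = 'b' ∧ c = 'r'
        · obtain ⟨rfl, rfl, rfl⟩ := h4
          rw [if_pos ⟨rfl, rfl, rfl⟩]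
          decide
        · rw [if_neg h4]
          by_cases h5 : a = 'm' ∧ b = 'a' ∧ c = 'i'
          · obtain ⟨rfl, rfl, rfl⟩ := h5
            rw [if_pos ⟨rfl, rfl, rfl⟩]
            decide
          · rw [if_neg h5]
            by_cases h6 : a = 'j' ∧ b = 'u' ∧ c = 'n'
            · obtain ⟨rfl, rfl, rfl⟩ := h6
              rw [if_pos ⟨rfl, rfl, rfl⟩]
              decide
            · rw [if_neg h6]
              by_cases h7 : a = 'j' ∧ b = 'u' ∧ c = 'l'
              · obtain ⟨rfl, rfl, rfl⟩ := h7
                rw [if_pos ⟨rfl, rfl, rfl⟩]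
                decide
              · rw [if_neg h7]
                by_cases h8 : a = 'a' ∧ b = 'g' ∧ c = 'o'
                · obtain ⟨rfl, rfl, rfl⟩ := h8
                  rw [if_pos ⟨rfl, rfl, rfl⟩]
                  decide
                · rw [if_neg h8]
                  by_cases h9 : a = 's' ∧ b = 'e' ∧ c = 't'
                  · obtain ⟨rfl, rfl, rfl⟩ := h9
                    rw [if_pos ⟨rfl, rfl, rfl⟩]
                    decide
                  · rw [if_neg h9]
                    by_cases h10 : a = 'o' ∧ b = 'u' ∧ c = 't'
                    · obtain ⟨rfl, rfl, rfl⟩ := h10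
                      rw [if_pos ⟨rfl, rfl, rfl⟩]
                      decide
                    · rw [if_neg h10]
                      by_cases h11 : a = 'n' ∧ b = 'o' ∧ c = 'v'
                      · obtain ⟨rfl, rfl, rfl⟩ := h11
                        rw [if_pos ⟨rfl, rfl, rfl⟩]
                        decide
                      · rw [if_neg h11]
                        by_cases h12 : a = 'd' ∧ b = 'e' ∧ c = 'z'
                        · obtain ⟨rfl, rfl, rfl⟩ := h12
                          rw [if_pos ⟨rfl, rfl, rfl⟩]
                          decide
                        · rw [if_neg h12]
                          cases hlk : pvMeses.lookup [' ', a, b, c, ' '] with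
                          | none => rfl
                          | some v =>
                            exfalso
                            have hm := pvLookup_mem hlk
                            fin_cases hm <;> simp_all

-- a lookup miss for every window that is not of the form " XYZ "
theorem pvLookupNoneOf (l : List Char) (h : ∀ x y z, l ≠ [' ', x, y, z, ' ']) :
    pvMeses.lookup l = none := by
  cases hlk : pvMeses.lookup l with
  | none => rfl
  | some v =>
    obtain ⟨x, y, z, hl, _⟩ := pvKeyShape (l, v) (pvLookup_mem hlk)
    exact absurd hl (h x y z)

-- bridge: B's space-framed 3-letter scan is the window-lookup scan
theorem pvScanBridge : ∀ (fuel : Nat) (s : List Char), pvScanOld fuel s = pvScanGo fuel s := by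
  intro fuel
  induction fuel with
  | zero => intro s; rfl
  | succ n ih =>
    intro s
    cases s with
    | nil => rfl
    | cons c t =>
      rw [pvScanOld]
      rcases t with _ | ⟨a, _ | ⟨b, _ | ⟨d, _ | ⟨e, rest⟩⟩⟩⟩
      · rw [pvLookupNoneOf _ (by intro x y z h; simp at h),
          pvScanGo.eq_4 _ _ _ (by intro _ _ _ _ _ h; simp at h), ite_self]
        exact congrArg (List.cons c) (ih _)
      · rw [pvLookupNoneOf _ (by intro x y z h; simp at h),
          pvScanGo.eq_4 _ _ _ (by intro _ _ _ _ _ h; simp at h), ite_self]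
        exact congrArg (List.cons c) (ih _)
      · rw [pvLookupNoneOf _ (by intro x y z h; simp at h),
          pvScanGo.eq_4 _ _ _ (by intro _ _ _ _ _ h; simp at h), ite_self]
        exact congrArg (List.cons c) (ih _)
      · rw [pvLookupNoneOf _ (by intro x y z h; simp at h),
          pvScanGo.eq_4 _ _ _ (by intro _ _ _ _ _ h; simp at h), ite_self]
        exact congrArg (List.cons c) (ih _)
      · rw [pvScanGo.eq_3]
        by_cases hc : c = ' '
        · subst hc
          rw [if_pos rfl]
          by_cases he : e = ' '
          · subst he
            rw [if_pos rfl]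
            have htake : ((' ' : Char) :: a :: b :: d :: ' ' :: rest).take 5 =
                [' ', a, b, d, ' '] := rfl
            rw [htake, pvAbrLookup]
            cases habr : pvAbr a b d with
            | some num =>
              have hdrop : (a :: b :: d :: ' ' :: rest).drop 4 = rest := rfl
              rw [hdrop, ih]
              simp
            | none => exact congrArg (List.cons ' ') (ih _)
          · rw [if_neg he,
              pvLookupNoneOf _ (by
                intro x y z h
                simp only [List.take, List.cons.injEq] at h
                exact he h.2.2.2.2.1)]
            exact congrArg (List.cons ' ') (ih _)
        · rw [if_neg hc,
            pvLookupNoneOf _ (by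
              intro x y z h
              injection h with h1 _
              exact hc h1)]
          exact congrArg (List.cons c) (ih _)

-- ===== VERDICT (by name: the statement is the Claim_ definition above) =====
theorem converte_abrevmes_para_nummes_spec : Claim_equal_converte_abrevmes_para_nummes := by
  intro data _ hpre
  unfold Spec_converte_abrevmes_para_nummes
  unfold converte_abrevmes_para_nummes converte_abrevmes_para_nummes_alt
  have h1 : pvMeses.foldl
      (fun d kv => if PySem.Chars.isIn kv.1 d then PySem.Chars.replace d kv.1 ('/' :: kv.2 ++ ['/']) else d)
      data.toList = pvMeses.foldl pvStepA data.toList := rfl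
  rw [h1, PySem.List.foldl_congr_mem _ pvStepA pvStepR _ pvStepAEq,
      pvMain data.toList.length data.toList le_rfl hpre, pvScanBridge]
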